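-- pv_equiv track=rewrite | github.com/pypi-data/pypi-mirror-396 | packages/hamtaa-texttools/hamtaa_texttools-1.1.19-py3-none-any.whl/texttools/internals/formatters.py | user_merge_format
-- ===== SOURCE A (Python) =====
-- def user_merge_format(messages: list[dict[str, str]]) -> list[dict[str, str]]:
--     """
--     Merges consecutive user messages into a single message, separated by newlines.
--
--     This is useful for condensing a multi-turn user input into a single
--     message for the LLM. Assistant and system messages are left unchanged and
--     act as separators between user message groups.
--     """
--     merged: list[dict[str, str]] = []
--
--     for message in messages:
--         role, content = message["role"], message["content"].strip()
--
--         # Merge with previous user turn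
--         if merged and role == "user" and merged[-1]["role"] == "user":
--             merged[-1]["content"] += "\n" + content
--
--         # Otherwise, start a new turn
--         else:
--             merged.append({"role": role, "content": content})
--
--     return merged
-- ===== SOURCE B (Python) =====
-- def user_merge_format(messages: list[dict[str, str]]) -> list[dict[str, str]]:
--     """Group-then-render: split messages into maximal consecutive same-role runs,
--     then render each run (user runs become one joined message)."""
--     runs: list[tuple[str, list[str]]] = []
--     for message in messages:
--         role, content = message["role"], message["content"]
--         if runs and runs[-1][0] == role:
--             runs[-1][1].append(content)
--         else:
--             runs.append((role, [content]))
--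
--     result: list[dict[str, str]] = []
--     for role, contents in runs:
--         if role == "user":
--             result.append({"role": "user", "content": "\n".join(c.strip() for c in contents)})
--         else:
--             for c in contents:
--                 result.append({"role": role, "content": c.strip()})
--     return result
-- ===== Notes on version B (the rewrite author's own statement) =====
-- stated objective: alternative
-- what changed: B first splits the message list into maximal consecutive same-role runs and then renders each run (joining a user run's stripped contents with newlines), replacing A's element-by-element merged[-1] lookback-and-mutate loop.
import Mathlib
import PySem

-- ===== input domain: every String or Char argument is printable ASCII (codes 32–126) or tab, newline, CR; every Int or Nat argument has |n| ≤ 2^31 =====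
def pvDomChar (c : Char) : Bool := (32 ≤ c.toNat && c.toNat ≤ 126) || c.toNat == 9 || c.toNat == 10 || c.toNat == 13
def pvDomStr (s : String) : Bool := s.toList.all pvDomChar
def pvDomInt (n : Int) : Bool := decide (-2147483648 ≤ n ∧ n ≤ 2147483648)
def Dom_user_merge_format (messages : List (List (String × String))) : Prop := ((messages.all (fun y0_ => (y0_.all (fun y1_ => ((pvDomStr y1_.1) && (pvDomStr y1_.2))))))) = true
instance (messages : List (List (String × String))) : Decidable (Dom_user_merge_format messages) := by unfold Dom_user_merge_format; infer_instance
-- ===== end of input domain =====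

-- B groups the list into maximal consecutive same-role runs first and renders each run,
-- instead of A's element-by-element lookback on merged[-1]; same cost, different decomposition.

-- ===== PORT A =====
-- message[k] (KeyError = none, excluded by Pre_; "" default is only reached outside Pre_)
def pvGetS (m : List (String × String)) (k : String) : String :=
  ((PySem.Dict.mk m).get? k).getD ""

-- loop body of A; `merged` is kept newest-first (Python appends/edits at the end), reversed at the end
def pvAStep (merged : List (List (String × String))) (message : List (String × String)) :
    List (List (String × String)) :=
  let role := pvGetS message "role"
  let content := PySem.Str.strip (pvGetS message "content")
  match merged with
  | prev :: rest =>
      if role = "user" ∧ pvGetS prev "role" = "user" then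
        ((PySem.Dict.mk prev).insert "content" (pvGetS prev "content" ++ ("\n" ++ content))).items :: rest
      else [("role", role), ("content", content)] :: prev :: rest
  | [] => [[("role", role), ("content", content)]]

def user_merge_format (messages : List (List (String × String))) : List (List (String × String)) :=
  (messages.foldl pvAStep []).reverse

-- ===== PORT B =====
-- phase 1 loop body: runs kept newest-first, each run's contents newest-first (Python appends)
def pvBStep (runs : List (String × List String)) (message : List (String × String)) :
    List (String × List String) :=
  let role := pvGetS message "role"
  let content := pvGetS message "content"
  match runs with
  | (r0, cs) :: rest =>
      if r0 = role then (r0, content :: cs) :: rest else (role, [content]) :: (r0, cs) :: rest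
  | [] => [(role, [content])]

-- phase 2: render one run
def pvRender (p : String × List String) : List (List (String × String)) :=
  if p.1 = "user" then
    [[("role", "user"), ("content", PySem.Str.join "\n" (p.2.map PySem.Str.strip))]]
  else p.2.map (fun c => [("role", p.1), ("content", PySem.Str.strip c)])

def user_merge_format_alt (messages : List (List (String × String))) : List (List (String × String)) :=
  (((messages.foldl pvBStep []).reverse.map (fun p => (p.1, p.2.reverse))).flatMap pvRender)

-- ===== PRECONDITION & SPEC =====
-- Pre_ excludes exactly the messages lacking a "role" or "content" key, on which Python A raises KeyError.
def Pre_user_merge_format (messages : List (List (String × String))) : Prop :=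
  ∀ m ∈ messages, ((PySem.Dict.mk m).contains "role" ∧ (PySem.Dict.mk m).contains "content")
instance (messages : List (List (String × String))) : Decidable (Pre_user_merge_format messages) := by
  unfold Pre_user_merge_format; infer_instance

def pvWitness_user_merge_format : (List (List (String × String))) :=
  [[("role", "user"), ("content", " hi ")], [("role", "user"), ("content", "again")],
   [("role", "assistant"), ("content", "ok")]]

def Spec_user_merge_format (messages : List (List (String × String))) (out : List (List (String × String))) : Prop := out = user_merge_format_alt messages
instance (messages : List (List (String × String))) (out : List (List (String × String))) : Decidable (Spec_user_merge_format messages out) := by unfold Spec_user_merge_format; infer_instance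

-- ===== CLAIM (what is proved, stated in full; the proofs are below) =====
def Claim_equal_user_merge_format : Prop := ∀ (messages : List (List (String × String))), Dom_user_merge_format messages → Pre_user_merge_format messages → Spec_user_merge_format messages (user_merge_format messages)

-- ===== LEMMAS AND PROOFS =====

-- render a run that is still stored newest-first (the shape A's accumulator has)
def pvRenderRev (runs : List (String × List String)) : List (List (String × String)) :=
  runs.flatMap (fun p =>
    if p.1 = "user" then
      [[("role", "user"), ("content", PySem.Str.join "\n" (p.2.reverse.map PySem.Str.strip))]]
    else p.2.map (fun c => [("role", p.1), ("content", PySem.Str.strip c)]))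

lemma pv_join_single (y : String) : PySem.Str.join "\n" [y] = y := by
  apply String.toList_inj.mp
  simp [PySem.Str.toList_join, PySem.Chars.join, List.intercalate]

lemma pv_chars_join_snoc (sep p : List Char) (l : List (List Char)) (h : l ≠ []) :
    PySem.Chars.join sep (l ++ [p]) = PySem.Chars.join sep l ++ sep ++ p := by
  induction l with
  | nil => exact absurd rfl h
  | cons a t ih =>
    cases t with
    | nil => simp [PySem.Chars.join, List.intercalate, List.append_assoc]
    | cons b t' =>
      have ih' := ih (by simp)
      rw [List.cons_append] at ih'
      simp only [List.cons_append]
      rw [PySem.Chars.join_cons_cons, ih', PySem.Chars.join_cons_cons]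
      simp [List.append_assoc]

lemma pv_join_snoc (xs : List String) (y : String) (h : xs ≠ []) :
    PySem.Str.join "\n" (xs ++ [y]) = PySem.Str.join "\n" xs ++ ("\n" ++ y) := by
  apply String.toList_inj.mp
  simp only [PySem.Str.toList_join, List.map_append, List.map_cons, List.map_nil,
    String.toList_append]
  rw [pv_chars_join_snoc _ _ _ (by simpa using h)]
  simp [List.append_assoc]

lemma pv_get_role (r c : String) : pvGetS [("role", r), ("content", c)] "role" = r := by
  simp [pvGetS, pysem]

lemma pv_get_content (r c : String) : pvGetS [("role", r), ("content", c)] "content" = c := by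
  simp [pvGetS, pysem]

lemma pv_insert_content (r c v : String) :
    ((PySem.Dict.mk [("role", r), ("content", c)]).insert "content" v).items
      = [("role", r), ("content", v)] := by
  simp [pysem]

lemma pv_step_comm (runs : List (String × List String)) (m : List (String × String))
    (hv : ∀ p ∈ runs, p.2 ≠ []) :
    pvAStep (pvRenderRev runs) m = pvRenderRev (pvBStep runs m) := by
  cases runs with
  | nil =>
    by_cases hr : pvGetS m "role" = "user" <;>
      simp [pvAStep, pvBStep, pvRenderRev, hr, pv_join_single]
  | cons q rest =>
    obtain ⟨r0, cs⟩ := q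
    obtain ⟨c0, cs'⟩ := (List.exists_cons_of_ne_nil (hv (r0, cs) (by simp)))
    obtain ⟨cs', rfl⟩ := cs'
    by_cases h0 : r0 = "user"
    · subst h0
      by_cases hr : pvGetS m "role" = "user"
      · -- both the head run and the new message are user: A edits merged[-1], B extends the run
        simp only [pvBStep, pvRenderRev, pvAStep, hr, List.flatMap_cons]
        simp only [if_true, true_and, List.singleton_append, List.flatMap_cons]
        rw [if_pos (pv_get_role "user" _), pv_get_content, pv_insert_content]
        congr 1
        rw [show ((pvGetS m "content" :: c0 :: cs').reverse)
              = ((c0 :: cs').reverse ++ [pvGetS m "content"]) from by simp]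
        rw [List.map_append, List.map_cons, List.map_nil, pv_join_snoc _ _ (by simp)]
      · simp [pvBStep, pvRenderRev, pvAStep, hr, Ne.symm hr, pv_get_role]
    · -- head run is not a user run: A never merges into it
      by_cases hr : r0 = pvGetS m "role"
      · simp [pvBStep, pvRenderRev, pvAStep, pv_get_role, hr ▸ h0, hr]
      · by_cases hu : pvGetS m "role" = "user" <;>
          simp [pvBStep, pvRenderRev, pvAStep, pv_get_role, h0, hr, hu, pv_join_single]

lemma pv_step_valid (runs : List (String × List String)) (m : List (String × String))
    (hv : ∀ p ∈ runs, p.2 ≠ []) : ∀ p ∈ pvBStep runs m, p.2 ≠ [] := by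
  cases runs with
  | nil => simp [pvBStep]
  | cons q rest =>
    obtain ⟨r0, cs⟩ := q
    simp only [pvBStep]
    split_ifs with h
    · intro p hp
      rcases List.mem_cons.mp hp with rfl | h2
      · simp
      · exact hv p (List.mem_cons_of_mem _ h2)
    · intro p hp
      rcases List.mem_cons.mp hp with rfl | h2
      · simp
      · exact hv p h2

lemma pv_fold_comm (msgs : List (List (String × String))) (runs : List (String × List String))
    (hv : ∀ p ∈ runs, p.2 ≠ []) :
    msgs.foldl pvAStep (pvRenderRev runs) = pvRenderRev (msgs.foldl pvBStep runs) := by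
  induction msgs generalizing runs with
  | nil => rfl
  | cons m t ih =>
    simp only [List.foldl_cons, pv_step_comm runs m hv]
    exact ih _ (pv_step_valid runs m hv)

lemma pv_renderRev_reverse (runs : List (String × List String)) :
    (pvRenderRev runs).reverse
      = ((runs.reverse.map (fun p => (p.1, p.2.reverse))).flatMap pvRender) := by
  induction runs with
  | nil => rfl
  | cons q rest ih =>
    obtain ⟨r0, cs⟩ := q
    simp only [pvRenderRev, List.flatMap_cons, List.reverse_append, List.reverse_cons,
      List.map_append, List.map_cons, List.map_nil, List.flatMap_append, List.flatMap_cons,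
      List.flatMap_nil, List.append_nil]
    rw [← ih]
    simp only [pvRenderRev]
    congr 1
    by_cases h0 : r0 = "user" <;> simp [pvRender, h0]

-- ===== VERDICT (by name: the statement is the Claim_ definition above) =====
theorem user_merge_format_spec : Claim_equal_user_merge_format := by
  intro messages _ _
  show user_merge_format messages = user_merge_format_alt messages
  unfold user_merge_format user_merge_format_alt
  rw [show ([] : List (List (String × String))) = pvRenderRev [] from rfl,
    pv_fold_comm messages [] (by simp), pv_renderRev_reverse]
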